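-- pv_equiv track=rewrite | github.com/YichengZou626/COMP431_INTERNET-SERVICES-PROTOCOLS | client.py | let_dig_str
-- ===== SOURCE A (Python) =====
-- def let_dig_str(line):
--     length = 0
--     for i in range(len(line)):
--         if let_dig(line[i]):
--             length += 1
--         else:
--             break
--     return length
--
-- def let_dig(char):
--     if is_letter(char) or is_digital(char):
--         return True
--     else:
--         return False
--
-- def is_letter(char):
--     if 64 < ord(char) < 91 or 96 < ord(char) < 123:
--         return True
--     else:
--         return False
--
-- def is_digital(char):
--     if 47 < ord(char) < 58:
--         return True
--     else:
--         return False
-- ===== SOURCE B (Python) =====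
-- import re
--
-- _LEAD_ALNUM = re.compile(r'[A-Za-z0-9]*')
--
-- def let_dig_str(line):
--     return len(_LEAD_ALNUM.match(line).group())
-- ===== Notes on version B (the rewrite author's own statement) =====
-- stated objective: idiomatic
-- what changed: Replaced the explicit per-character index loop with ord-range helper predicates by a single precompiled regex match of the leading ASCII-alphanumeric run.
import Mathlib
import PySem

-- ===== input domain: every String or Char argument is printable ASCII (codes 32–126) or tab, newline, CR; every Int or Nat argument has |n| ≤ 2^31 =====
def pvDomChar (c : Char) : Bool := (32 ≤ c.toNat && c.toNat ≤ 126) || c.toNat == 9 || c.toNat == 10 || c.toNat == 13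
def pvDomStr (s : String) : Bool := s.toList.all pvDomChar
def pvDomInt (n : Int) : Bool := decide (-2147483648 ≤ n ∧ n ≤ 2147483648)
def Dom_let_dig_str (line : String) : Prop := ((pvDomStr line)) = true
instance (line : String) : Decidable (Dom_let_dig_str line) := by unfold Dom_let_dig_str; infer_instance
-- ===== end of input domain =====

-- ===== PORT A =====
-- B replaces the index loop and ord-range helpers by a single anchored character-class match (idiomatic regex in Python); return values proved equal.
def is_letter (c : Char) : Bool :=
  if (64 < c.toNat && c.toNat < 91) || (96 < c.toNat && c.toNat < 123) then true else false

def is_digital (c : Char) : Bool :=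
  if 47 < c.toNat && c.toNat < 58 then true else false

def let_dig (c : Char) : Bool :=
  if is_letter c || is_digital c then true else false

-- the for-loop with break, over the characters of the line
def letDigLoop : List Char → Int → Int
  | [], length => length
  | c :: rest, length => if let_dig c then letDigLoop rest (length + 1) else length

def let_dig_str (line : String) : Int := letDigLoop line.toList 0

-- ===== PORT B =====
-- Lean rendering of the regex class [A-Za-z0-9]; the anchored '[A-Za-z0-9]*' match is the longest prefix of such chars
def bAlnum (c : Char) : Bool :=
  ('A' ≤ c && c ≤ 'Z') || ('a' ≤ c && c ≤ 'z') || ('0' ≤ c && c ≤ '9')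

def let_dig_str_alt (line : String) : Int :=
  ((line.toList.takeWhile bAlnum).length : Int)

-- ===== PRECONDITION & SPEC =====
def Spec_let_dig_str (line : String) (out : Int) : Prop := out = let_dig_str_alt line
instance (line : String) (out : Int) : Decidable (Spec_let_dig_str line out) := by unfold Spec_let_dig_str; infer_instance

-- ===== CLAIM (what is proved, stated in full; the proofs are below) =====
def Claim_equal_let_dig_str : Prop := ∀ (line : String), Dom_let_dig_str line → Spec_let_dig_str line (let_dig_str line)

-- ===== LEMMAS AND PROOFS =====

-- ===== VERDICT (by name: the statement is the Claim_ definition above) =====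
lemma letDigLoop_takeWhile (l : List Char) (acc : Int) :
    letDigLoop l acc = acc + ((l.takeWhile bAlnum).length : Int) := by
  induction l generalizing acc with
  | nil => simp [letDigLoop]
  | cons c rest ih =>
    have hpred : let_dig c = bAlnum c := by
      simp only [let_dig, is_letter, is_digital, bAlnum]
      rcases c with ⟨n, hn⟩
      simp [Char.le_def, UInt32.le_iff_toNat_le, Char.toNat]
      rw [Bool.eq_iff_iff]; simp; omega
    by_cases h : bAlnum c = true
    · simp [letDigLoop, hpred, h, List.takeWhile, ih]
      omega
    · simp [letDigLoop, hpred, h, List.takeWhile]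

-- ===== VERDICT (by name: the statement is the Claim_ definition above) =====
theorem let_dig_str_spec : Claim_equal_let_dig_str := by
  intro line _
  unfold Spec_let_dig_str let_dig_str let_dig_str_alt
  rw [letDigLoop_takeWhile]
  omega
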